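-- pv_equiv track=rewrite | github.com/zcyh147/xypyutil | xypyutil.py | find_duplication
-- ===== SOURCE A (Python) =====
-- def find_duplication(mylist):
--     """
--     - find and index all duplicates in a list
--       - in: [1, 2, 3, 2, 4, 1, 5]
--       - out: {1: [0, 5], 2: [1, 3]}
--     - useful for later conflict resolution
--     """
--     seen, dups = set(), set()
--     for idx, item in enumerate(mylist):
--         if item in seen:
--             dups.add(item)
--         else:
--             seen.add(item)
--     return {dup: [idx for idx, item in enumerate(mylist) if item == dup] for dup in dups}
-- ===== SOURCE B (Python) =====
-- def find_duplication(mylist):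
--     """
--     - find and index all duplicates in a list
--       - in: [1, 2, 3, 2, 4, 1, 5]
--       - out: {1: [0, 5], 2: [1, 3]}
--     - useful for later conflict resolution
--     """
--     positions = {}
--     dup_order = []
--     for idx, item in enumerate(mylist):
--         positions.setdefault(item, []).append(idx)
--         if len(positions[item]) == 2:
--             dup_order.append(item)
--     return {dup: positions[dup] for dup in dup_order}
-- ===== Notes on version B (the rewrite author's own statement) =====
-- stated objective: alternative
-- what changed: One pass that accumulates every value's index list in a dict (recording a value as duplicate when its list reaches length 2), replacing A's two-set detection pass plus a full re-scan of the list per duplicate value; on duplicate-light inputs both are effectively linear, so no speed is claimed.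
import Mathlib
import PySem

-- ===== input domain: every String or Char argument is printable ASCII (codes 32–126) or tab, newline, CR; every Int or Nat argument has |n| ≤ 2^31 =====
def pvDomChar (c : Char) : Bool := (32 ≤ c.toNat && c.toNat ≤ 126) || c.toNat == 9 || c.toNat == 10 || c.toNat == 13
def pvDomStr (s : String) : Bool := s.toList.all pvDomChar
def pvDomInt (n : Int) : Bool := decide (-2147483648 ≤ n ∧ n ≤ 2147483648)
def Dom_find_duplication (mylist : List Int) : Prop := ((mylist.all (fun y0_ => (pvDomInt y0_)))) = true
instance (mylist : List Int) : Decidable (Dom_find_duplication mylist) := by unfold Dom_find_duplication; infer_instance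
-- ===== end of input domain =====

-- B replaces A's two-set detection pass plus a per-duplicate full re-scan with a single
-- indexing pass over enumerate (dict value -> index list, duplicates recorded when a list
-- reaches length 2). Return-value equivalence only; the Python dicts compare ignoring order.

-- ===== PORT A =====
def find_duplication (mylist : List Int) : List (Int × List Int) :=
  let sd := (PySem.List.enumerate mylist 0).foldl
    (fun (sd : PySem.Set Int × PySem.Set Int) p =>
      if sd.1.contains p.2 then (sd.1, sd.2.add p.2) else (sd.1.add p.2, sd.2))
    (PySem.Set.empty, PySem.Set.empty)
  sd.2.map (fun dup =>
    (dup, (PySem.List.enumerate mylist 0).foldl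
      (fun acc p => if p.2 = dup then acc ++ [p.1] else acc) []))

-- ===== PORT B =====
def find_duplication_alt (mylist : List Int) : List (Int × List Int) :=
  let st := (PySem.List.enumerate mylist 0).foldl
    (fun (st : PySem.Dict Int (List Int) × List Int) p =>
      let pos := st.1.modify p.2 [] (· ++ [p.1])
      (pos, if (pos.getD p.2 []).length = 2 then st.2 ++ [p.2] else st.2))
    (PySem.Dict.empty, [])
  st.2.map (fun dup => (dup, st.1.getD dup []))

-- ===== PRECONDITION & SPEC =====
def Spec_find_duplication (mylist : List Int) (out : List (Int × List Int)) : Prop := out = find_duplication_alt mylist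
instance (mylist : List Int) (out : List (Int × List Int)) : Decidable (Spec_find_duplication mylist out) := by unfold Spec_find_duplication; infer_instance

-- ===== CLAIM (what is proved, stated in full; the proofs are below) =====
def Claim_equal_find_duplication : Prop := ∀ (mylist : List Int), Dom_find_duplication mylist → Spec_find_duplication mylist (find_duplication mylist)

-- ===== LEMMAS AND PROOFS =====

/-- One loop iteration preserves the joint invariant of A's and B's folds. -/

theorem pv_step (l : List (Int × Int)) (p : Int × Int)
    (A : PySem.Set Int × PySem.Set Int) (B : PySem.Dict Int (List Int) × List Int)
    (h1 : A.1 = PySem.Set.ofList (l.map (·.2)))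
    (h2 : A.2 = B.2)
    (h3 : ∀ v : Int, v ∈ A.2 ↔ 2 ≤ (l.filter (fun q => q.2 == v)).length)
    (h4 : ∀ v : Int, B.1.getD v [] = (l.filter (fun q => q.2 == v)).map (·.1)) :
    ((if A.1.contains p.2 then (A.1, A.2.add p.2) else (A.1.add p.2, A.2)).1
        = PySem.Set.ofList ((l ++ [p]).map (·.2)))
  ∧ ((if A.1.contains p.2 then (A.1, A.2.add p.2) else (A.1.add p.2, A.2)).2
        = (let pos := B.1.modify p.2 [] (· ++ [p.1]);
           (pos, if (pos.getD p.2 []).length = 2 then B.2 ++ [p.2] else B.2)).2)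
  ∧ (∀ v : Int, v ∈ (if A.1.contains p.2 then (A.1, A.2.add p.2) else (A.1.add p.2, A.2)).2
        ↔ 2 ≤ ((l ++ [p]).filter (fun q => q.2 == v)).length)
  ∧ (∀ v : Int, ((let pos := B.1.modify p.2 [] (· ++ [p.1]);
           (pos, if (pos.getD p.2 []).length = 2 then B.2 ++ [p.2] else B.2)).1).getD v []
        = ((l ++ [p]).filter (fun q => q.2 == v)).map (·.1)) := by
  have hfa : ∀ v : Int, (l ++ [p]).filter (fun q => q.2 == v)
      = l.filter (fun q => q.2 == v) ++ if p.2 = v then [p] else [] := by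
    intro v
    rw [List.filter_append]
    congr 1
    by_cases h : p.2 = v <;> simp [h]
  have hpos : ∀ v : Int, (B.1.modify p.2 [] (· ++ [p.1])).getD v []
      = if v = p.2 then (l.filter (fun q => q.2 == p.2)).map (·.1) ++ [p.1]
        else (l.filter (fun q => q.2 == v)).map (·.1) := by
    intro v
    rw [PySem.Dict.getD_modify]
    split_ifs with h
    · subst h; rw [h4]
    · rw [h4]
  have hconjB : ∀ v : Int, ((let pos := B.1.modify p.2 [] (· ++ [p.1]);
           (pos, if (pos.getD p.2 []).length = 2 then B.2 ++ [p.2] else B.2)).1).getD v []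
        = ((l ++ [p]).filter (fun q => q.2 == v)).map (·.1) := by
    intro v
    show (B.1.modify p.2 [] (· ++ [p.1])).getD v [] = _
    rw [hpos, hfa, List.map_append]
    by_cases h : v = p.2
    · subst h; simp
    · have h' : ¬ p.2 = v := fun e => h e.symm
      simp [h, h']
  have hlenpos : ((B.1.modify p.2 [] (· ++ [p.1])).getD p.2 []).length
      = (l.filter (fun q => q.2 == p.2)).length + 1 := by
    rw [hpos]; simp
  have hmem_iff : p.2 ∈ l.map (·.2) ↔ 1 ≤ (l.filter (fun q => q.2 == p.2)).length := by
    constructor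
    · intro hm
      obtain ⟨q, hq, he⟩ := List.mem_map.mp hm
      have hf : q ∈ l.filter (fun r => r.2 == p.2) := List.mem_filter.mpr ⟨hq, by simp [he]⟩
      have hlen := List.length_pos_of_mem hf
      omega
    · intro hl
      obtain ⟨q, hq⟩ := List.exists_mem_of_length_pos (l := l.filter (fun q => q.2 == p.2)) (by omega)
      have hf := List.mem_filter.mp hq
      exact List.mem_map.mpr ⟨q, hf.1, by simpa using hf.2⟩
  have hcont : A.1.contains p.2 = true ↔ 1 ≤ (l.filter (fun q => q.2 == p.2)).length := by
    rw [h1, PySem.Set.contains_iff, PySem.Set.mem_ofList, hmem_iff]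
  have hofl : PySem.Set.ofList ((l ++ [p]).map (·.2))
      = PySem.Set.add (PySem.Set.ofList (l.map (·.2))) p.2 := by
    rw [List.map_append, show List.map (fun x : Int × Int => x.2) [p] = [p.2] from rfl]
    exact PySem.Set.ofList_append_singleton _ _
  by_cases hc : 1 ≤ (l.filter (fun q => q.2 == p.2)).length
  · -- p.2 already seen
    have hct : A.1.contains p.2 = true := hcont.mpr hc
    have hmv : p.2 ∈ PySem.Set.ofList (l.map (·.2)) :=
      (PySem.Set.mem_ofList _ _).mpr (hmem_iff.mpr hc)
    have hconj1 : (if A.1.contains p.2 then (A.1, A.2.add p.2) else (A.1.add p.2, A.2)).1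
        = PySem.Set.ofList ((l ++ [p]).map (·.2)) := by
      simp only [hct, if_true]
      rw [h1, hofl, PySem.Set.add_of_mem hmv]
    by_cases h1c : (l.filter (fun q => q.2 == p.2)).length = 1
    · -- second occurrence: both append p.2
      have hnot : p.2 ∉ A.2 := fun h => by have := (h3 p.2).mp h; omega
      refine ⟨hconj1, ?_, ?_, hconjB⟩
      · show _ = (if ((B.1.modify p.2 [] (· ++ [p.1])).getD p.2 []).length = 2
            then B.2 ++ [p.2] else B.2)
        simp only [hct, if_true, hlenpos, h1c]
        rw [PySem.Set.add_of_not_mem hnot, h2]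
      · intro v
        simp only [hct, if_true]
        rw [PySem.Set.mem_add, hfa, List.length_append]
        by_cases hv : p.2 = v
        · subst hv
          simp [h1c, hnot]
        · have hv' : ¬ v = p.2 := fun e => hv e.symm
          rw [h3]
          simp [hv, hv']
    · -- third or later occurrence: both unchanged
      have hmem : p.2 ∈ A.2 := (h3 p.2).mpr (by omega)
      refine ⟨hconj1, ?_, ?_, hconjB⟩
      · show _ = (if ((B.1.modify p.2 [] (· ++ [p.1])).getD p.2 []).length = 2
            then B.2 ++ [p.2] else B.2)
        have hne2 : ¬ ((l.filter (fun q => q.2 == p.2)).length + 1 = 2) := by omega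
        simp only [hct, if_true, hlenpos, hne2, if_false]
        rw [PySem.Set.add_of_mem hmem, h2]
      · intro v
        simp only [hct, if_true]
        rw [PySem.Set.mem_add, hfa, List.length_append]
        by_cases hv : p.2 = v
        · subst hv
          simp [hmem]
          omega
        · have hv' : ¬ v = p.2 := fun e => hv e.symm
          rw [h3]
          simp [hv, hv']
  · -- first occurrence
    have h0 : (l.filter (fun q => q.2 == p.2)).length = 0 := by omega
    have hct : ¬ A.1.contains p.2 = true := fun h => hc (hcont.mp h)
    refine ⟨?_, ?_, ?_, hconjB⟩
    · rw [if_neg hct]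
      show A.1.add p.2 = _
      rw [h1, hofl]
    · rw [if_neg hct]
      show A.2 = (if ((B.1.modify p.2 [] (· ++ [p.1])).getD p.2 []).length = 2
          then B.2 ++ [p.2] else B.2)
      rw [hlenpos, if_neg (by omega : ¬ ((l.filter (fun q => q.2 == p.2)).length + 1 = 2))]
      exact h2
    · intro v
      rw [if_neg hct]
      show v ∈ A.2 ↔ _
      rw [hfa, List.length_append, h3]
      by_cases hv : p.2 = v
      · subst hv
        simp
        omega
      · simp [hv]


/-- Joint loop invariant for A's detection fold and B's indexing fold, over any pair list. -/
theorem pv_master (l : List (Int × Int)) :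
    (l.foldl
      (fun (sd : PySem.Set Int × PySem.Set Int) p =>
        if sd.1.contains p.2 then (sd.1, sd.2.add p.2) else (sd.1.add p.2, sd.2))
      (PySem.Set.empty, PySem.Set.empty)).1
      = PySem.Set.ofList (l.map (·.2)) ∧
    (l.foldl
      (fun (sd : PySem.Set Int × PySem.Set Int) p =>
        if sd.1.contains p.2 then (sd.1, sd.2.add p.2) else (sd.1.add p.2, sd.2))
      (PySem.Set.empty, PySem.Set.empty)).2
      = (l.foldl
          (fun (st : PySem.Dict Int (List Int) × List Int) p =>
            let pos := st.1.modify p.2 [] (· ++ [p.1])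
            (pos, if (pos.getD p.2 []).length = 2 then st.2 ++ [p.2] else st.2))
          (PySem.Dict.empty, [])).2 ∧
    (∀ v : Int, v ∈ (l.foldl
      (fun (sd : PySem.Set Int × PySem.Set Int) p =>
        if sd.1.contains p.2 then (sd.1, sd.2.add p.2) else (sd.1.add p.2, sd.2))
      (PySem.Set.empty, PySem.Set.empty)).2
        ↔ 2 ≤ (l.filter (fun p => p.2 == v)).length) ∧
    (∀ v : Int, ((l.foldl
          (fun (st : PySem.Dict Int (List Int) × List Int) p =>
            let pos := st.1.modify p.2 [] (· ++ [p.1])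
            (pos, if (pos.getD p.2 []).length = 2 then st.2 ++ [p.2] else st.2))
          (PySem.Dict.empty, [])).1).getD v []
        = (l.filter (fun p => p.2 == v)).map (·.1)) := by
  induction l using List.reverseRecOn with
  | nil => refine ⟨rfl, rfl, ?_, ?_⟩ <;> intro v <;> simp [PySem.Dict.getD_empty]
  | append_singleton l p ih =>
    obtain ⟨ih1, ih2, ih3, ih4⟩ := ih
    simp only [List.foldl_append, List.foldl_cons, List.foldl_nil]
    exact pv_step l p _ _ ih1 ih2 ih3 ih4

theorem find_duplication_eq (mylist : List Int) :
    find_duplication mylist = find_duplication_alt mylist := by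
  obtain ⟨h1, h2, h3, h4⟩ := pv_master (PySem.List.enumerate mylist 0)
  simp only [find_duplication, find_duplication_alt]
  rw [h2]
  apply List.map_congr_left
  intro d _
  refine congrArg (Prod.mk d) ?_
  rw [h4 d]
  simpa using PySem.List.foldl_append_if (l := PySem.List.enumerate mylist 0)
    (p := fun p : Int × Int => p.2 == d) (f := fun p => p.1) (acc := [])

-- ===== VERDICT (by name: the statement is the Claim_ definition above) =====
theorem find_duplication_spec : Claim_equal_find_duplication := by
  intro mylist _
  unfold Spec_find_duplication
  exact find_duplication_eq mylist
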